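-- pv_equiv track=rewrite | github.com/xph9876/RNA-mediated_DSB_repair | 2_graph_processing/common.py | merge_variation_info_insertions
-- ===== SOURCE A (Python) =====
-- VARIATION_INFO_POS = 0
--
-- VARIATION_INFO_TYPE = 1
--
-- VARIATION_INFO_LETTER = 2
--
-- def merge_variation_info_insertions(variation_info):
--   variation_info_merged = []
--   i = 0
--   while i < len(variation_info):
--     current_info = list(variation_info[i])
--     if current_info[VARIATION_INFO_TYPE] != 'insertion':
--       i += 1
--     else:
--       i += 1
--       while (
--         (i < len(variation_info)) and
--         (variation_info[i][VARIATION_INFO_POS] == current_info[VARIATION_INFO_POS]) and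
--         (variation_info[i][VARIATION_INFO_TYPE] == 'insertion')
--       ):
--         current_info[VARIATION_INFO_LETTER] += variation_info[i][VARIATION_INFO_LETTER]
--         i += 1
--     variation_info_merged.append(tuple(current_info))
--   return variation_info_merged
-- ===== SOURCE B (Python) =====
-- def merge_variation_info_insertions(variation_info):
--   merged = []
--   for pos, typ, letter in variation_info:
--     if typ == 'insertion' and merged and merged[-1][1] == 'insertion' and merged[-1][0] == pos:
--       last = merged[-1]
--       merged[-1] = (last[0], last[1], last[2] + letter)
--     else:
--       merged.append((pos, typ, letter))
--   return merged
-- ===== Notes on version B (the rewrite author's own statement) =====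
-- stated objective: simpler
-- what changed: Replaces A's index-based outer while with an inner lookahead while-loop by a single flat loop that looks back at the last appended result element and extends its letter field when it is an insertion at the same position.
import Mathlib
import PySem

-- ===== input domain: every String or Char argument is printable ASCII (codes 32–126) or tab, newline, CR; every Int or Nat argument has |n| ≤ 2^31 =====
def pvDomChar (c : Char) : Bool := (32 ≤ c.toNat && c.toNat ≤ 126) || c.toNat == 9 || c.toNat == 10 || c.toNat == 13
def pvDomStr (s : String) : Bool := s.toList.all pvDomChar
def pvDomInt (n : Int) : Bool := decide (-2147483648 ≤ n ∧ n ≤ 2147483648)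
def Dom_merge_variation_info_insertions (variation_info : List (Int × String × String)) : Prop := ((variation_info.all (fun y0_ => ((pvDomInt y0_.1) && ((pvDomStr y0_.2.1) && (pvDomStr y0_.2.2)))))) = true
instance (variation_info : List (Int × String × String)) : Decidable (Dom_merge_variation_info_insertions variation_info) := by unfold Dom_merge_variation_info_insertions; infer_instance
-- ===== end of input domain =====

-- B is a simpler single flat loop with a look-back on the output instead of A's inner lookahead while-loop; return values proved equal on all inputs.

-- ===== PORT A =====
-- inner while-loop of A: consume the run of insertions at position `pos`,
-- returning the remaining suffix and the concatenation of the consumed letters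
def pvTakeRun (xs : List (Int × String × String)) (pos : Int) : List (Int × String × String) × String :=
  match xs with
  | [] => ([], "")
  | y :: ys =>
    if y.1 = pos ∧ y.2.1 = "insertion" then
      let r := pvTakeRun ys pos
      (r.1, y.2.2 ++ r.2)
    else (y :: ys, "")

-- needed by the port's termination proof
theorem pvTakeRun_len (xs : List (Int × String × String)) (pos : Int) :
    (pvTakeRun xs pos).1.length ≤ xs.length := by
  induction xs with
  | nil => simp [pvTakeRun]
  | cons y ys ih =>
    simp only [pvTakeRun]
    split
    · simpa using Nat.le_succ_of_le ih
    · simp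

def merge_variation_info_insertions (variation_info : List (Int × String × String)) : List (Int × String × String) :=
  match variation_info with
  | [] => []
  | x :: xs =>
    if x.2.1 ≠ "insertion" then x :: merge_variation_info_insertions xs
    else
      let r := pvTakeRun xs x.1
      (x.1, x.2.1, x.2.2 ++ r.2) :: merge_variation_info_insertions r.1
termination_by variation_info.length
decreasing_by
  · simp
  · have := pvTakeRun_len xs x.1; simp; omega

-- ===== PORT B =====
-- loop body of Source B: look back at the last appended element of `merged`
def pvStepB (merged : List (Int × String × String)) (item : Int × String × String) : List (Int × String × String) :=
  match merged.getLast? with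
  | some last =>
    if item.2.1 = "insertion" ∧ last.2.1 = "insertion" ∧ last.1 = item.1 then
      merged.dropLast ++ [(last.1, last.2.1, last.2.2 ++ item.2.2)]
    else merged ++ [item]
  | none => merged ++ [item]

def merge_variation_info_insertions_alt (variation_info : List (Int × String × String)) : List (Int × String × String) :=
  variation_info.foldl pvStepB []

-- ===== PRECONDITION & SPEC =====
def Spec_merge_variation_info_insertions (variation_info : List (Int × String × String)) (out : List (Int × String × String)) : Prop := out = merge_variation_info_insertions_alt variation_info
instance (variation_info : List (Int × String × String)) (out : List (Int × String × String)) : Decidable (Spec_merge_variation_info_insertions variation_info out) := by unfold Spec_merge_variation_info_insertions; infer_instance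

-- ===== CLAIM (what is proved, stated in full; the proofs are below) =====
def Claim_equal_merge_variation_info_insertions : Prop := ∀ (variation_info : List (Int × String × String)), Dom_merge_variation_info_insertions variation_info → Spec_merge_variation_info_insertions variation_info (merge_variation_info_insertions variation_info)

-- ===== LEMMAS AND PROOFS =====

-- the head of the suffix left by pvTakeRun does not continue the run
theorem pvTakeRun_stop (xs : List (Int × String × String)) (pos : Int) :
    ∀ h, ((pvTakeRun xs pos).1).head? = some h → ¬(h.1 = pos ∧ h.2.1 = "insertion") := by
  induction xs with
  | nil => intro h hh; simp [pvTakeRun] at hh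
  | cons y ys ih =>
    intro h hh
    simp only [pvTakeRun] at hh
    split at hh
    · exact ih h hh
    · rename_i hc
      simp at hh
      subst hh
      exact hc

-- B's fold, started with an open insertion run as the last element, absorbs exactly pvTakeRun's run
theorem pvFold_run (xs : List (Int × String × String)) :
    ∀ (acc : List (Int × String × String)) (p : Int) (l : String),
    List.foldl pvStepB (acc ++ [(p, "insertion", l)]) xs =
    List.foldl pvStepB (acc ++ [(p, "insertion", l ++ (pvTakeRun xs p).2)]) (pvTakeRun xs p).1 := by
  induction xs with
  | nil => intro acc p l; simp [pvTakeRun]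
  | cons y ys ih =>
    intro acc p l
    by_cases hc : y.1 = p ∧ y.2.1 = "insertion"
    · have htr : pvTakeRun (y :: ys) p = ((pvTakeRun ys p).1, y.2.2 ++ (pvTakeRun ys p).2) := by
        simp only [pvTakeRun]; rw [if_pos hc]
      have hstep : pvStepB (acc ++ [(p, "insertion", l)]) y
          = acc ++ [(p, "insertion", l ++ y.2.2)] := by
        simp [pvStepB, hc.2, hc.1]
      calc List.foldl pvStepB (acc ++ [(p, "insertion", l)]) (y :: ys)
          = List.foldl pvStepB (acc ++ [(p, "insertion", l ++ y.2.2)]) ys := by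
            rw [List.foldl_cons, hstep]
        _ = List.foldl pvStepB (acc ++ [(p, "insertion", (l ++ y.2.2) ++ (pvTakeRun ys p).2)]) (pvTakeRun ys p).1 := ih acc p (l ++ y.2.2)
        _ = _ := by rw [htr, String.append_assoc]
    · have htr : pvTakeRun (y :: ys) p = (y :: ys, "") := by
        simp only [pvTakeRun]; rw [if_neg hc]
      rw [htr]
      simp

-- main invariant: if the last accumulated element cannot merge with the head of xs,
-- B's fold from acc appends exactly A's result for xs
theorem pvFold_main : ∀ (n : Nat) (xs acc : List (Int × String × String)), xs.length ≤ n →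
    (∀ last h, acc.getLast? = some last → xs.head? = some h →
      ¬(h.2.1 = "insertion" ∧ last.2.1 = "insertion" ∧ last.1 = h.1)) →
    List.foldl pvStepB acc xs = acc ++ merge_variation_info_insertions xs := by
  intro n
  induction n with
  | zero =>
    intro xs acc hlen _
    have : xs = [] := List.eq_nil_of_length_eq_zero (Nat.le_zero.mp hlen)
    subst this
    simp [merge_variation_info_insertions]
  | succ n ih =>
    intro xs acc hlen hclosed
    match xs with
    | [] => simp [merge_variation_info_insertions]
    | ⟨a, b, c⟩ :: xs' =>
      have hstep : pvStepB acc (a, b, c) = acc ++ [(a, b, c)] := by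
        unfold pvStepB
        split
        · rename_i last hl
          rw [if_neg]
          intro hcond
          exact hclosed last (a, b, c) hl rfl ⟨hcond.1, hcond.2.1, hcond.2.2⟩
        · rfl
      rw [List.foldl_cons, hstep]
      by_cases hx : b = "insertion"
      · subst hx
        have hrun := pvFold_run xs' acc a c
        have hlen2 : (pvTakeRun xs' a).1.length ≤ n := by
          have := pvTakeRun_len xs' a
          simp at hlen
          omega
        have hclosed2 : ∀ last h,
            (acc ++ [(a, "insertion", c ++ (pvTakeRun xs' a).2)]).getLast? = some last →
            (pvTakeRun xs' a).1.head? = some h →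
            ¬(h.2.1 = "insertion" ∧ last.2.1 = "insertion" ∧ last.1 = h.1) := by
          intro last h hl hh hcond
          rw [List.getLast?_concat] at hl
          have hl' := Option.some.inj hl
          apply pvTakeRun_stop xs' a h hh
          refine ⟨?_, hcond.1⟩
          rw [← hl'] at hcond
          exact hcond.2.2.symm
        rw [hrun, ih (pvTakeRun xs' a).1 _ hlen2 hclosed2]
        rw [merge_variation_info_insertions]
        rw [if_neg (by simp)]
        simp
      · have hclosed3 : ∀ last h, (acc ++ [(a, b, c)]).getLast? = some last → xs'.head? = some h →
            ¬(h.2.1 = "insertion" ∧ last.2.1 = "insertion" ∧ last.1 = h.1) := by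
          intro last h hl hh hcond
          rw [List.getLast?_concat] at hl
          have := Option.some.inj hl
          rw [← this] at hcond
          exact hx hcond.2.1
        have hlen3 : xs'.length ≤ n := by simp at hlen; omega
        rw [ih xs' (acc ++ [(a, b, c)]) hlen3 hclosed3]
        rw [merge_variation_info_insertions]
        rw [if_pos (by simpa using hx)]
        simp

-- ===== VERDICT (by name: the statement is the Claim_ definition above) =====
theorem merge_variation_info_insertions_spec : Claim_equal_merge_variation_info_insertions := by
  intro v _
  unfold Spec_merge_variation_info_insertions merge_variation_info_insertions_alt
  have := pvFold_main v.length v [] le_rfl (by intro last h hl _; simp at hl)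
  simp at this
  exact this.symm
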